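-- pv_equiv track=rewrite | github.com/slavkomitic/HackerRankPy | superreducedstring.py | superReducedString3
-- ===== SOURCE A (Python) =====
-- def superReducedString3(s):
--     index = 0
--     while index < len(s) - 1 and len(s) > 0:
--         if s[index] == s[index+1]:
--             s = s[:index] + s[index+2:]
--             index = 0
--             continue
--         index += 1
--     if len(s) == 0:
--         return 'Empty String'
--     return s
-- ===== SOURCE B (Python) =====
-- def superReducedString3(s):
--     stack = []
--     for c in s:
--         if stack and stack[-1] == c:
--             stack.pop()
--         else:
--             stack.append(c)
--     return ''.join(stack) if stack else 'Empty String'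
-- ===== Notes on version B (the rewrite author's own statement) =====
-- stated objective: faster
-- what changed: Replaces A's restart-from-zero scan with repeated slice-rebuilds by a single left-to-right pass over the string with a stack (push a char, pop when it equals the top).
import Mathlib
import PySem

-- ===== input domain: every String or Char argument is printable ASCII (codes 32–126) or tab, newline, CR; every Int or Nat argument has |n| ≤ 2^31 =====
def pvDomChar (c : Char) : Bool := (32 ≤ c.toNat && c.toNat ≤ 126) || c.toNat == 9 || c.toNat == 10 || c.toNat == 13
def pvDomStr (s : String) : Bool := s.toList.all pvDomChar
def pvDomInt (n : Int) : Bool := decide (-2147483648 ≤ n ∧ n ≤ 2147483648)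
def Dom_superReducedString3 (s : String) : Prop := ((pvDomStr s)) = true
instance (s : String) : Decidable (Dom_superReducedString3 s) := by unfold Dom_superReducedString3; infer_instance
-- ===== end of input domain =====

-- B replaces A's quadratic restart-from-zero pair-deletion loop by a single stack pass (asymptotically faster).


-- ===== PORT A =====
-- Python's while loop with mutable s and index; s[:index] and s[index+2:] ported via PySem.List.slice.
def pvALoop (s : List Char) (index : Nat) : List Char :=
  if h : index < s.length - 1 ∧ 0 < s.length then
    if s[index]'(by omega) = s[index+1]'(by omega) then
      pvALoop (PySem.List.slice s none (some (index : Int)) ++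
               PySem.List.slice s (some ((index : Int) + 2)) none) 0
    else
      pvALoop s (index + 1)
  else s
termination_by (s.length, s.length - index)
decreasing_by
  · left
    rw [List.length_append, PySem.List.slice_to_natCast,
        show ((index : Int) + 2) = ((index + 2 : Nat) : Int) by push_cast; ring,
        PySem.List.slice_from_natCast, List.length_take, List.length_drop]
    omega
  · right
    omega

def superReducedString3 (s : String) : String :=
  let r := pvALoop s.toList 0
  if r.length = 0 then "Empty String" else String.ofList r

-- ===== PORT B =====
-- B's Python list used as a stack (append/pop at the end) is transcribed as a Lean list with its head as the stack top.
def pvStep (st : List Char) (c : Char) : List Char :=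
  match st with
  | t :: rest => if t = c then rest else c :: t :: rest
  | [] => [c]

def superReducedString3_alt (s : String) : String :=
  let st := s.toList.foldl pvStep []
  if st = [] then "Empty String" else String.ofList st.reverse

-- ===== PRECONDITION & SPEC =====
def Spec_superReducedString3 (s : String) (out : String) : Prop := out = superReducedString3_alt s
instance (s : String) (out : String) : Decidable (Spec_superReducedString3 s out) := by unfold Spec_superReducedString3; infer_instance

-- ===== CLAIM (what is proved, stated in full; the proofs are below) =====
def Claim_equal_superReducedString3 : Prop := ∀ (s : String), Dom_superReducedString3 s → Spec_superReducedString3 s (superReducedString3 s)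

-- ===== LEMMAS AND PROOFS =====

-- the stack never holds two equal adjacent characters
lemma pvStep_chain (st : List Char) (c : Char) (h : List.IsChain Ne st) :
    List.IsChain Ne (pvStep st c) := by
  match st with
  | [] => simp [pvStep]
  | t :: rest =>
    simp only [pvStep]
    split_ifs with he
    · exact h.tail
    · exact List.isChain_cons_cons.mpr ⟨Ne.symm he, h⟩

lemma pvFold_chain (xs : List Char) (st : List Char) (h : List.IsChain Ne st) :
    List.IsChain Ne (xs.foldl pvStep st) := by
  induction xs generalizing st with
  | nil => exact h
  | cons x t ih => exact ih _ (pvStep_chain st x h)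

-- two equal characters in a row cancel on a reduced stack
lemma pvStep_double (st : List Char) (c : Char) (h : List.IsChain Ne st) :
    pvStep (pvStep st c) c = st := by
  match st with
  | [] => simp [pvStep]
  | t :: rest =>
    simp only [pvStep]
    split_ifs with he
    · subst he
      match rest with
      | [] => simp
      | b :: r2 =>
        have hb : t ≠ b := List.isChain_cons_cons.mp h |>.1
        simp [Ne.symm hb]
    · simp

lemma pvFold_cancel (xs ys : List Char) (c : Char) (st : List Char) (h : List.IsChain Ne st) :
    (xs ++ c :: c :: ys).foldl pvStep st = (xs ++ ys).foldl pvStep st := by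
  have hred := pvFold_chain xs st h
  simp only [List.foldl_append, List.foldl_cons]
  rw [pvStep_double _ c hred]

-- over an already-reduced list (no equal neighbours) the stack just accumulates the reverse
lemma pvFold_reduced (xs : List Char) (st : List Char) (h : List.IsChain Ne xs)
    (hc : ∀ a ∈ xs.head?, ∀ b ∈ st.head?, a ≠ b) :
    xs.foldl pvStep st = xs.reverse ++ st := by
  induction xs generalizing st with
  | nil => simp
  | cons x t ih =>
    obtain ⟨hx, ht⟩ := List.isChain_cons.mp h
    have hstep : pvStep st x = x :: st := by
      match st with
      | [] => simp [pvStep]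
      | b :: r =>
        have : x ≠ b := hc x (by simp) b (by simp)
        simp [pvStep, Ne.symm this]
    rw [List.foldl_cons, hstep, ih (x :: st) ht ?hc']
    · simp
    case hc' =>
      intro a ha b hb
      simp only [List.head?_cons, Option.mem_def, Option.some.injEq] at hb
      subst hb
      exact (hx a ha).symm

-- main correspondence: A's loop computes the stack reduction, given the scanned prefix has no equal neighbours
lemma pvALoop_eq (s : List Char) (index : Nat)
    (hinv : ∀ j, (hj : j + 1 < s.length) → j < index → s[j] ≠ s[j+1]) :
    pvALoop s index = (s.foldl pvStep []).reverse := by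
  induction s, index using pvALoop.induct with
  | case1 s index h heq ih =>
    rw [pvALoop, dif_pos h, if_pos heq, ih (by omega)]
    congr 1
    set c := s[index]'(by omega) with hc
    have h2 : index + 2 ≤ s.length := by omega
    have hsplit : s = s.take index ++ c :: c :: s.drop (index + 2) := by
      conv_lhs => rw [← List.take_append_drop index s]
      have hd : s.drop index = c :: c :: s.drop (index + 2) := by
        rw [List.drop_eq_getElem_cons (by omega),
            List.drop_eq_getElem_cons (l := s) (i := index + 1) (by omega)]
        have h12 : index + 1 + 1 = index + 2 := by omega
        rw [h12, ← heq, ← hc]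
      rw [hd]
    have hslice : PySem.List.slice s none (some (index : Int)) ++
        PySem.List.slice s (some ((index : Int) + 2)) none = s.take index ++ s.drop (index + 2) := by
      rw [PySem.List.slice_to_natCast,
          show ((index : Int) + 2) = ((index + 2 : Nat) : Int) by push_cast; ring,
          PySem.List.slice_from_natCast]
    rw [hslice]
    conv_rhs => rw [hsplit]
    rw [pvFold_cancel _ _ _ _ (by simp)]
  | case2 s index h hne ih =>
    rw [pvALoop, dif_pos h, if_neg hne]
    apply ih
    intro j hj hji
    rcases Nat.lt_succ_iff_lt_or_eq.mp hji with hl | he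
    · exact hinv j hj hl
    · subst he; exact hne
  | case3 s index h =>
    rw [pvALoop, dif_neg h]
    have hchain : List.IsChain Ne s := by
      rw [List.isChain_iff_getElem]
      intro i hi
      exact hinv i hi (by omega)
    rw [pvFold_reduced s [] hchain (by simp), List.append_nil, List.reverse_reverse]

-- ===== VERDICT (by name: the statement is the Claim_ definition above) =====
theorem superReducedString3_spec : Claim_equal_superReducedString3 := by
  intro s _
  unfold Spec_superReducedString3 superReducedString3 superReducedString3_alt
  rw [pvALoop_eq s.toList 0 (by intro j hj hji; omega)]
  simp only [List.length_reverse]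
  by_cases h : s.toList.foldl pvStep [] = []
  · simp [h]
  · rw [if_neg (by simpa using h), if_neg h]
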